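-- pv_equiv track=rewrite | github.com/ryanvilbrandt/personal | nerdle_generator.py | pattern_generator
-- ===== SOURCE A (Python) =====
-- from typing import List
--
-- def pattern_generator(pattern_so_far: str, max_length: int) -> List[str]:
--     if len(pattern_so_far) == max_length:
--         # Don't allow patterns that end with +
--         if pattern_so_far.endswith("+"):
--             return []
--         # Don't allow patterns that are only digits
--         if "+" not in pattern_so_far:
--             return []
--         # No triple-digit or greater numbers allowed
--         # if "N###" in pattern_so_far:
--         #     return []
--         return [pattern_so_far]
--     # Every number must start with a non-zero digit
--     if pattern_so_far == "" or pattern_so_far.endswith("+"):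
--         c_list = ["N"]
--     else:
--         c_list = ["+", "#"]
--     new_list = []
--     for c in c_list:
--         new_list += pattern_generator(pattern_so_far + c, max_length)
--     return new_list
-- ===== SOURCE B (Python) =====
-- def pattern_generator(pattern_so_far: str, max_length: int):
--     # Iterative DFS with an explicit LIFO stack; children pushed in reverse
--     # so the first branch is processed first (same output order as A).
--     results = []
--     stack = [pattern_so_far]
--     while stack:
--         p = stack.pop()
--         if len(p) == max_length:
--             if not p.endswith("+") and "+" in p:
--                 results.append(p)
--         else:
--             if p == "" or p.endswith("+"):
--                 cs = ["N"]
--             else: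
--                 cs = ["+", "#"]
--             for c in reversed(cs):
--                 stack.append(p + c)
--     return results
-- ===== Notes on version B (the rewrite author's own statement) =====
-- stated objective: alternative
-- what changed: Replaces A's recursive DFS (each call concatenating child results) with an iterative loop over an explicit LIFO stack that accumulates results directly, pushing children in reverse so the output order is identical.
import Mathlib
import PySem

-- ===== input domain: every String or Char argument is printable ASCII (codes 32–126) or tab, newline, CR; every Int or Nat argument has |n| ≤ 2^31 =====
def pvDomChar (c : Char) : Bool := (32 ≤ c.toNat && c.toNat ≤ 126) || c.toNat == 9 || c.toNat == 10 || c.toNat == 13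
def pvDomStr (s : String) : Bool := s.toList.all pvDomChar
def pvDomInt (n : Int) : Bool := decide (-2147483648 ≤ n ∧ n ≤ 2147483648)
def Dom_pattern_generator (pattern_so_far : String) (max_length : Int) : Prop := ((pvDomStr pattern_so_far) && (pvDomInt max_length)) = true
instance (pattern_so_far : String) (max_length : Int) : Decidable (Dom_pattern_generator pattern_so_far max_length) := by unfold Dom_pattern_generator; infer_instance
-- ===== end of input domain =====

-- B replaces A's recursive DFS by an iterative explicit-stack loop (different decomposition, same cost).

-- ===== PORT A =====
-- 'p.endswith("+")' : true iff the last character is '+' (false on "")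
def pvEndsPlus (p : List Char) : Bool := p.getLast? == some '+'

-- literal port of A's recursion; fuel = max_length - len(pattern) makes the
-- recursion structural (on inputs with len ≤ max_length the fuel is exact and never runs out)
def pvPgA (m : Int) : Nat → List Char → List String
  | fuel, p =>
    if (p.length : Int) = m then
      if pvEndsPlus p then []
      else if !(p.contains '+') then []
      else [String.mk p]
    else
      match fuel with
      | 0 => []
      | f + 1 =>
        let c_list := if p = [] ∨ pvEndsPlus p then ['N'] else ['+', '#']
        -- 'for c in c_list: new_list += pattern_generator(pattern_so_far + c, max_length)'
        c_list.foldl (fun acc c => acc ++ pvPgA m f (p ++ [c])) []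

def pattern_generator (pattern_so_far : String) (max_length : Int) : List String :=
  pvPgA max_length (max_length - (pattern_so_far.toList.length : Int)).toNat pattern_so_far.toList

-- ===== PORT B =====
-- the while-loop of Source B; head of the list = top of the Python stack;
-- fuel bounds the number of loop iterations (3^(m-len) suffices on len ≤ m)
def pvPgB (m : Int) : Nat → List (List Char) → List String → List String
  | _, [], acc => acc
  | 0, _ :: _, acc => acc
  | f + 1, p :: rest, acc =>
    if (p.length : Int) = m then
      if !pvEndsPlus p && p.contains '+' then pvPgB m f rest (acc ++ [String.mk p])
      else pvPgB m f rest acc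
    else
      let cs := if p = [] ∨ pvEndsPlus p then ['N'] else ['+', '#']
      -- 'for c in reversed(cs): stack.append(p + c)'
      pvPgB m f (cs.reverse.foldl (fun st c => (p ++ [c]) :: st) rest) acc

def pattern_generator_alt (pattern_so_far : String) (max_length : Int) : List String :=
  pvPgB max_length (3 ^ (max_length - (pattern_so_far.toList.length : Int)).toNat)
    [pattern_so_far.toList] []

-- ===== PRECONDITION & SPEC =====
-- Pre_ excludes len(pattern_so_far) > max_length, on which A raises RecursionError
def Pre_pattern_generator (pattern_so_far : String) (max_length : Int) : Prop :=
  (pattern_so_far.toList.length : Int) ≤ max_length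
instance (pattern_so_far : String) (max_length : Int) : Decidable (Pre_pattern_generator pattern_so_far max_length) := by unfold Pre_pattern_generator; infer_instance
def pvWitness_pattern_generator : String × Int := ("N+", 4)

def Spec_pattern_generator (pattern_so_far : String) (max_length : Int) (out : List String) : Prop := out = pattern_generator_alt pattern_so_far max_length
instance (pattern_so_far : String) (max_length : Int) (out : List String) : Decidable (Spec_pattern_generator pattern_so_far max_length out) := by unfold Spec_pattern_generator; infer_instance

-- ===== CLAIM (what is proved, stated in full; the proofs are below) =====
def Claim_equal_pattern_generator : Prop := ∀ (pattern_so_far : String) (max_length : Int), Dom_pattern_generator pattern_so_far max_length → Pre_pattern_generator pattern_so_far max_length → Spec_pattern_generator pattern_so_far max_length (pattern_generator pattern_so_far max_length)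

-- ===== LEMMAS AND PROOFS =====

-- potential of a stack entry: an upper bound on the loop iterations it generates
def pvPot (m : Int) (p : List Char) : Nat := 3 ^ (m - (p.length : Int)).toNat

theorem pvFoldlCons {α β : Type} (f : α → β) :
    ∀ (l : List α) (st : List β), l.foldl (fun st c => f c :: st) st = (l.map f).reverse ++ st := by
  intro l
  induction l with
  | nil => simp
  | cons a t ih => intro st; simp [List.foldl, ih]

theorem pvPush {α β : Type} (f : α → β) (cs : List α) (st : List β) :
    cs.reverse.foldl (fun st c => f c :: st) st = cs.map f ++ st := by
  rw [pvFoldlCons]; simp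

theorem pvMain (m : Int) :
    ∀ (fuel : Nat) (stack : List (List Char)) (acc : List String),
      (∀ p ∈ stack, (p.length : Int) ≤ m) →
      (stack.map (pvPot m)).sum ≤ fuel →
      pvPgB m fuel stack acc =
        acc ++ stack.flatMap (fun p => pvPgA m (m - (p.length : Int)).toNat p) := by
  intro fuel
  induction fuel with
  | zero =>
    intro stack acc hlen hsum
    cases stack with
    | nil => simp [pvPgB]
    | cons p rest =>
      exfalso
      have h1 : 1 ≤ pvPot m p := Nat.one_le_pow _ _ (by norm_num)
      simp [List.map, List.sum_cons] at hsum
      omega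
  | succ f ih =>
    intro stack acc hlen hsum
    cases stack with
    | nil => simp [pvPgB]
    | cons p rest =>
      have hp : (p.length : Int) ≤ m := hlen p (List.mem_cons_self ..)
      have hrest : ∀ q ∈ rest, (q.length : Int) ≤ m := fun q hq => hlen q (List.mem_cons_of_mem _ hq)
      have hpot : 1 ≤ pvPot m p := Nat.one_le_pow _ _ (by norm_num)
      have hsum' : pvPot m p + (rest.map (pvPot m)).sum ≤ f + 1 := by
        simpa [List.map, List.sum_cons] using hsum
      by_cases h1 : (p.length : Int) = m
      · -- leaf: A returns the filtered singleton, B appends it to acc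
        have hk : (m - (p.length : Int)).toNat = 0 := by omega
        have hA : pvPgA m (m - (p.length : Int)).toNat p =
            if !pvEndsPlus p && p.contains '+' then [String.mk p] else [] := by
          rw [hk]
          simp only [pvPgA, if_pos h1]
          cases pvEndsPlus p <;> cases p.contains '+' <;> simp
        have hrec : ∀ acc', pvPgB m f rest acc' =
            acc' ++ rest.flatMap (fun q => pvPgA m (m - (q.length : Int)).toNat q) :=
          fun acc' => ih rest acc' hrest (by omega)
        simp only [pvPgB, if_pos h1, List.flatMap_cons, hA]
        split
        · rw [hrec]; simp
        · rw [hrec]; simp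
      · -- internal node: B pushes the children, A recurses over them
        have hlt : (p.length : Int) < m := lt_of_le_of_ne hp h1
        set k : Nat := (m - ((p.length : Int) + 1)).toNat with hkdef
        have hk1 : (m - (p.length : Int)).toNat = k + 1 := by omega
        set cs : List Char := if p = [] ∨ pvEndsPlus p then ['N'] else ['+', '#'] with hcs
        have hcs2 : cs.length ≤ 2 := by rw [hcs]; split <;> simp
        have hA : pvPgA m (m - (p.length : Int)).toNat p =
            cs.flatMap (fun c => pvPgA m k (p ++ [c])) := by
          rw [hk1]
          simp only [pvPgA, if_neg h1]
          rw [PySem.List.foldl_append_eq_flatMap]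
          simp only [List.nil_append]
          rw [← hcs]
        have hchildlen : ∀ c : Char, ((p ++ [c]).length : Int) = (p.length : Int) + 1 := by
          intro c; simp
        have hchildpot : ∀ c : Char, pvPot m (p ++ [c]) = 3 ^ k := by
          intro c; simp only [pvPot, hchildlen]; rfl
        have hnewlen : ∀ q ∈ cs.map (fun c => p ++ [c]) ++ rest, ((q.length : Int) ≤ m) := by
          intro q hq
          rcases List.mem_append.mp hq with h | h
          · obtain ⟨c, _, rfl⟩ := List.mem_map.mp h
            rw [hchildlen]; omega
          · exact hrest q h
        have hnewsum : ((cs.map (fun c => p ++ [c]) ++ rest).map (pvPot m)).sum ≤ f := by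
          have hsumc : ((cs.map (fun c => p ++ [c])).map (pvPot m)).sum ≤ 2 * 3 ^ k := by
            have hb : ∀ x ∈ (cs.map (fun c => p ++ [c])).map (pvPot m), x ≤ 3 ^ k := by
              intro x hx
              simp only [List.map_map, List.mem_map, Function.comp] at hx
              obtain ⟨c, _, rfl⟩ := hx
              exact (hchildpot c).le
            have h2 := List.sum_le_card_nsmul _ _ hb
            simp only [List.length_map, smul_eq_mul] at h2
            have h3 : cs.length * 3 ^ k ≤ 2 * 3 ^ k := Nat.mul_le_mul_right _ hcs2
            omega
          have hpotp : pvPot m p = 3 * 3 ^ k := by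
            simp only [pvPot, hk1, pow_succ]; ring
          have h3 : 1 ≤ 3 ^ k := Nat.one_le_pow _ _ (by norm_num)
          rw [List.map_append, List.sum_append]
          omega
        have hrec := ih (cs.map (fun c => p ++ [c]) ++ rest) acc hnewlen hnewsum
        simp only [pvPgB, if_neg h1]
        rw [pvPush, hrec]
        simp only [List.flatMap_append, List.flatMap_cons, hA]
        congr 2
        rw [List.flatMap_map]
        -- rewrite the child fuel (m - len(child)).toNat = k
        refine List.flatMap_congr (fun c _ => ?_)
        have hkc : (m - ((p ++ [c]).length : Int)).toNat = k := by
          rw [hchildlen]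
        rw [hkc]

-- ===== VERDICT (by name: the statement is the Claim_ definition above) =====
theorem pattern_generator_spec : Claim_equal_pattern_generator := by
  intro s m _ hpre
  unfold Spec_pattern_generator pattern_generator pattern_generator_alt
  rw [pvMain m _ [s.toList] [] (by intro p hp; simp at hp; subst hp; exact hpre) (by simp [pvPot])]
  simp
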